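-- pv_equiv track=rewrite | github.com/NeoRescued/ITSchoolStep | Recursion Homework.py | find_min_sum_index
-- ===== SOURCE A (Python) =====
-- def find_min_sum_index(numbers, index=0, min_sum=float('inf'), min_index=0):
--     if index > len(numbers) - 10:
--         return min_index
--     current_sum = sum(numbers[index:index + 10])
--     if current_sum < min_sum:
--         min_sum = current_sum
--         min_index = index
--     return find_min_sum_index(numbers, index + 1, min_sum, min_index)
-- ===== SOURCE B (Python) =====
-- def find_min_sum_index(numbers, index=0, min_sum=float('inf'), min_index=0):
--     n = len(numbers)
--     if index > n - 10:
--         return min_index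
--     window = sum(numbers[index:index + 10])
--     best_sum, best_idx = min_sum, min_index
--     for i in range(index, n - 9):
--         if window < best_sum:
--             best_sum, best_idx = window, i
--         if i + 10 < n:
--             window += numbers[i + 10] - numbers[i]
--     return best_idx
-- ===== Notes on version B (the rewrite author's own statement) =====
-- stated objective: faster
-- what changed: Replaced the recursive recompute-each-window-sum pass (each step re-sums a 10-element slice, one stack frame per window) with a single iterative sliding-window pass that maintains a running sum (add the entering element, subtract the leaving one).
-- outside the precondition, e.g. on find_min_sum_index([5, 1, 1, 1, 1, 1, 1, 1, 1, 1, 1, 9], -1, 5, 2): A returns -1, B returns 1; on find_min_sum_index([], -30, 8, 9): A returns -30, B raises IndexError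
import Mathlib
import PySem

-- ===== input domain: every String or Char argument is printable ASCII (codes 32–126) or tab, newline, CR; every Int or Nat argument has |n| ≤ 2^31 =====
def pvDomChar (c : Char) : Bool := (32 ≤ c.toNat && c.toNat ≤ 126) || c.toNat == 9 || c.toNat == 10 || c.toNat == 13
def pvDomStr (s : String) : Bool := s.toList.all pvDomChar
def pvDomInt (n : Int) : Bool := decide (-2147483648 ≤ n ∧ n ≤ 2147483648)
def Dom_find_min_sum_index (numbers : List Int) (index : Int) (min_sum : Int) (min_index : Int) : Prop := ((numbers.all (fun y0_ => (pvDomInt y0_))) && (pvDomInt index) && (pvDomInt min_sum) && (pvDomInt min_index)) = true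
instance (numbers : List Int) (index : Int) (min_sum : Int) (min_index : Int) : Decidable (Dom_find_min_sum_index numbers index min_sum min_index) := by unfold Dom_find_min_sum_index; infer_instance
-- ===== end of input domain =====

-- B replaces A's recursive recompute-each-window pass by one iterative sliding-window
-- pass with a running sum (objective: faster by a constant factor, O(1) stack).

-- ===== PORT A =====
def find_min_sum_index (numbers : List Int) (index : Int) (min_sum : Int) (min_index : Int) : Int :=
  if index > (numbers.length : Int) - 10 then min_index
  else
    let current_sum := (PySem.List.slice numbers (some index) (some (index + 10))).sum
    if current_sum < min_sum then
      find_min_sum_index numbers (index + 1) current_sum index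
    else
      find_min_sum_index numbers (index + 1) min_sum min_index
termination_by ((numbers.length : Int) - 9 - index).toNat
decreasing_by all_goals omega

-- ===== PORT B =====
-- body of Source B's for-loop: state = (window, best_sum, best_idx)
def bStep (numbers : List Int) (n : Int) (st : Int × Int × Int) (i : Int) : Int × Int × Int :=
  let window := st.1
  let best_sum := st.2.1
  let best_idx := st.2.2
  let bs : Int × Int := if window < best_sum then (window, i) else (best_sum, best_idx)
  let window' := if i + 10 < n then
      window + PySem.List.pyGetD numbers (i + 10) 0 - PySem.List.pyGetD numbers i 0
    else window
  (window', bs.1, bs.2)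

def find_min_sum_index_alt (numbers : List Int) (index : Int) (min_sum : Int) (min_index : Int) : Int :=
  let n : Int := numbers.length
  if index > n - 10 then min_index
  else
    let window := (PySem.List.slice numbers (some index) (some (index + 10))).sum
    let st := (PySem.List.pyRange index (n - 9) 1).foldl (bStep numbers n) (window, min_sum, min_index)
    st.2.2

-- ===== PRECONDITION & SPEC =====
-- Pre_ admits every call whose starting index is non-negative, and every call that
-- returns immediately (index > len-10).  It excludes only negative starting indexes
-- that still enter the recursion: there A's slice wraparound makes the window sums
-- (and hence the returned index) accidental empty/wrapped-slice artefacts that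
-- neither behaviour would be specified, and B's natural loop differs (or raises).
def Pre_find_min_sum_index (numbers : List Int) (index : Int) (min_sum : Int) (min_index : Int) : Prop :=
  0 ≤ index ∨ index > (numbers.length : Int) - 10
instance (numbers : List Int) (index : Int) (min_sum : Int) (min_index : Int) : Decidable (Pre_find_min_sum_index numbers index min_sum min_index) := by unfold Pre_find_min_sum_index; infer_instance

def pvWitness_find_min_sum_index : List Int × Int × Int × Int :=
  ([3, 1, 4, 1, 5, 9, 2, 6, 5, 3, 5], 0, 1000000, 0)

def Spec_find_min_sum_index (numbers : List Int) (index : Int) (min_sum : Int) (min_index : Int) (out : Int) : Prop := out = find_min_sum_index_alt numbers index min_sum min_index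
instance (numbers : List Int) (index : Int) (min_sum : Int) (min_index : Int) (out : Int) : Decidable (Spec_find_min_sum_index numbers index min_sum min_index out) := by unfold Spec_find_min_sum_index; infer_instance

-- ===== CLAIM (what is proved, stated in full; the proofs are below) =====
def Claim_equal_find_min_sum_index : Prop := ∀ (numbers : List Int) (index : Int) (min_sum : Int) (min_index : Int), Dom_find_min_sum_index numbers index min_sum min_index → Pre_find_min_sum_index numbers index min_sum min_index → Spec_find_min_sum_index numbers index min_sum min_index (find_min_sum_index numbers index min_sum min_index)

-- ===== LEMMAS AND PROOFS =====

-- sliding-window identity on take/drop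
lemma slide_sum (xs : List Int) (j : Nat) (h : j + 10 < xs.length) :
    ((xs.drop (j + 1)).take 10).sum
      = ((xs.drop j).take 10).sum + xs[j + 10] - xs[j] := by
  have hj : j < xs.length := by omega
  have hdrop : xs.drop j = xs[j] :: xs.drop (j + 1) := List.drop_eq_getElem_cons hj
  have h9 : (xs.drop (j + 1))[9]? = some xs[j + 10] := by
    rw [List.getElem?_drop]
    conv_lhs => rw [show j + 1 + 9 = j + 10 from by omega]
    exact List.getElem?_eq_getElem (by omega)
  have h10 : (xs.drop (j + 1)).take 10 = (xs.drop (j + 1)).take 9 ++ [xs[j + 10]] := by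
    rw [List.take_add_one, h9]; rfl
  have hR : (xs.drop j).take 10 = xs[j] :: (xs.drop (j + 1)).take 9 := by
    rw [hdrop]; rfl
  rw [h10, hR, List.sum_append, List.sum_cons, List.sum_cons, List.sum_nil]
  ring

-- under 0 <= i the Python slice is a drop/take
lemma slice_sum_eq (xs : List Int) (i : Int) (hi : 0 ≤ i) :
    (PySem.List.slice xs (some i) (some (i + 10))).sum = ((xs.drop i.toNat).take 10).sum := by
  rw [PySem.List.slice_toNat xs hi (by omega)]
  congr 2
  omega

-- main loop invariant: B's fold from i equals A's recursion from i
lemma loop_eq (numbers : List Int) :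
    ∀ (i ms mi : Int), 0 ≤ i → i ≤ (numbers.length : Int) - 10 →
      ((PySem.List.pyRange i ((numbers.length : Int) - 9) 1).foldl (bStep numbers (numbers.length : Int))
        ((PySem.List.slice numbers (some i) (some (i + 10))).sum, ms, mi)).2.2
      = find_min_sum_index numbers i ms mi := by
  intro i ms mi hi0 hile
  induction hn : (((numbers.length : Int) - 10 - i).toNat) generalizing i ms mi with
  | zero =>
    -- i = len - 10 : last window, range has one element
    rw [PySem.List.pyRange_one_cons (by omega), PySem.List.pyRange_one_eq_nil (by omega),
        find_min_sum_index, if_neg (by omega)]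
    simp only [List.foldl_cons, List.foldl_nil, bStep]
    split_ifs with hlt
    · rw [find_min_sum_index, if_pos (by omega)]
    · rw [find_min_sum_index, if_pos (by omega)]
  | succ k ih =>
    -- i < len - 10 : slide the window
    have hg : i + 10 < (numbers.length : Int) := by omega
    have hj10 : i.toNat + 10 < numbers.length := by omega
    rw [PySem.List.pyRange_one_cons (by omega), find_min_sum_index, if_neg (by omega)]
    simp only [List.foldl_cons, bStep]
    rw [if_pos hg]
    have e1 : PySem.List.pyGetD numbers (i + 10) 0 = numbers[i.toNat + 10] := by
      rw [PySem.List.pyGetD_eq_getElem numbers 0 (by omega) (by omega)]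
      congr 1
      omega
    have e2 : PySem.List.pyGetD numbers i 0 = numbers[i.toNat] := by
      rw [PySem.List.pyGetD_eq_getElem numbers 0 hi0 (by omega)]
    have hw : (PySem.List.slice numbers (some i) (some (i + 10))).sum
        + PySem.List.pyGetD numbers (i + 10) 0 - PySem.List.pyGetD numbers i 0
        = (PySem.List.slice numbers (some (i + 1)) (some (i + 1 + 10))).sum := by
      rw [e1, e2, slice_sum_eq numbers i hi0, slice_sum_eq numbers (i + 1) (by omega),
          (show (i + 1).toNat = i.toNat + 1 by omega), slide_sum numbers i.toNat hj10]
    rw [hw]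
    split_ifs with hlt
    · exact ih (i + 1) _ _ (by omega) (by omega) (by omega)
    · exact ih (i + 1) _ _ (by omega) (by omega) (by omega)

-- ===== VERDICT (by name: the statement is the Claim_ definition above) =====
theorem find_min_sum_index_spec : Claim_equal_find_min_sum_index := by
  intro numbers index min_sum min_index _hDom hPre
  unfold Spec_find_min_sum_index find_min_sum_index_alt
  by_cases h : index > (numbers.length : Int) - 10
  · rw [find_min_sum_index]
    simp [h]
  · have hPos : 0 ≤ index := by
      rcases hPre with h' | h'
      · exact h'
      · exact absurd h' h
    simp only [if_neg h]
    exact (loop_eq numbers index min_sum min_index hPos (by omega)).symm
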